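-- pv_equiv track=rewrite | github.com/viing937/leetcode | algorithms/python/583.py | buildArr
-- ===== SOURCE A (Python) =====
-- def buildArr(word1, word2):
--     m = {}
--     for idx, ch in enumerate(word2):
--         if ch not in m:
--             m[ch] = []
--         m[ch].append(idx)
--     arr = []
--     for ch in word1:
--         if ch in m:
--             arr += m[ch][::-1]
--     return arr
-- ===== SOURCE B (Python) =====
-- def buildArr(word1, word2):
--     arr = []
--     for ch in word1:
--         for idx in range(len(word2) - 1, -1, -1):
--             if word2[idx] == ch:
--                 arr.append(idx)
--     return arr
-- ===== Notes on version B (the rewrite author's own statement) =====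
-- stated objective: alternative
-- what changed: Drops the char->index-list dictionary entirely: for each word1 character it scans word2 by index in reverse, appending matching indices directly (descending order replaces the per-key list reversal).
import Mathlib
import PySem

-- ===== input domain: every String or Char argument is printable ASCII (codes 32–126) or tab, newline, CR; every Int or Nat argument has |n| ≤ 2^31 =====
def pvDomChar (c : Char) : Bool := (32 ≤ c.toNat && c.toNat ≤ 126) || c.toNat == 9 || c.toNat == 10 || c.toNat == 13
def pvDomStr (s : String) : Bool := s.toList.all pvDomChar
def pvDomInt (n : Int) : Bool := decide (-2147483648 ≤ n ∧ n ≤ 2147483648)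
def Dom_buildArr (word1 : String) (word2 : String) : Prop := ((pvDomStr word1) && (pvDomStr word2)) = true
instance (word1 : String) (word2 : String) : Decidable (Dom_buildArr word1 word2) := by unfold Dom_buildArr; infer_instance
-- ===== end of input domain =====

-- B drops the char→index-list dictionary: per word1 character it scans word2 by index in reverse,
-- appending matching indices directly (alternative decomposition; not claimed faster).


-- ===== PORT A =====
-- one step of A's first loop: `if ch not in m: m[ch] = []` then `m[ch].append(idx)`
def buildArrStep (m : PySem.Dict Char (List Int)) (p : Int × Char) : PySem.Dict Char (List Int) :=
  let m' := if m.contains p.2 then m else m.insert p.2 []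
  m'.modify p.2 [] (fun l => l ++ [p.1])

def buildArr (word1 : String) (word2 : String) : List Int :=
  let m := (PySem.List.enumerate word2.toList 0).foldl buildArrStep PySem.Dict.empty
  word1.toList.foldl
    (fun arr ch => if m.contains ch then arr ++ (m.getD ch []).reverse else arr) []
    -- `m[ch][::-1]` under the `ch in m` guard is `(m.getD ch []).reverse` (PySem.List.slice?_none_none_neg_one)

-- ===== PORT B =====
def buildArr_alt (word1 : String) (word2 : String) : List Int :=
  word1.toList.foldl
    (fun arr ch =>
      (PySem.List.pyRange (PySem.Str.len word2 - 1) (-1) (-1)).foldl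
        (fun arr idx =>
          if PySem.List.pyGetD word2.toList idx ' ' == ch then arr ++ [idx] else arr) arr)
    []
    -- `word2[idx]` with idx drawn from range(len(word2)-1, -1, -1) is always in range, so pyGetD is exact

-- ===== PRECONDITION & SPEC =====
def Spec_buildArr (word1 : String) (word2 : String) (out : List Int) : Prop := out = buildArr_alt word1 word2
instance (word1 : String) (word2 : String) (out : List Int) : Decidable (Spec_buildArr word1 word2 out) := by unfold Spec_buildArr; infer_instance

-- ===== CLAIM (what is proved, stated in full; the proofs are below) =====
def Claim_equal_buildArr : Prop := ∀ (word1 : String) (word2 : String), Dom_buildArr word1 word2 → Spec_buildArr word1 word2 (buildArr word1 word2)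

-- ===== LEMMAS AND PROOFS =====

-- getD through one step of A's grouping loop
theorem pv_step_getD (m : PySem.Dict Char (List Int)) (p : Int × Char) (ch : Char) :
    (buildArrStep m p).getD ch [] =
      if ch = p.2 then m.getD p.2 [] ++ [p.1] else m.getD ch [] := by
  unfold buildArrStep
  by_cases hc : m.contains p.2
  · simp only [hc, if_true, PySem.Dict.getD_modify]
  · simp only [Bool.not_eq_true] at hc
    simp only [hc, Bool.false_eq_true, if_false, PySem.Dict.getD_modify]
    by_cases h : ch = p.2
    · simp [h, PySem.Dict.getD_insert_self, PySem.Dict.getD_of_not_contains m _ hc]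
    · simp [h, PySem.Dict.getD_insert_of_ne _ _ _ h]

-- getD through A's whole grouping loop: the ascending indices whose character is ch
theorem pv_fold_getD (l : List (Int × Char)) (m : PySem.Dict Char (List Int)) (ch : Char) :
    (l.foldl buildArrStep m).getD ch [] =
      m.getD ch [] ++ (l.filter (fun p => p.2 == ch)).map (·.1) := by
  induction l generalizing m with
  | nil => simp
  | cons p t ih =>
    simp only [List.foldl_cons, ih, pv_step_getD, List.filter_cons, List.map]
    by_cases h : ch = p.2
    · simp [h]
    · simp [h, Ne.symm h, beq_iff_eq]

-- enumerate-then-filter-then-project equals an index-range filter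
theorem pv_enum_filter (l : List Char) (ch : Char) (s : Int) :
    ((PySem.List.enumerate l s).filter (fun p => p.2 == ch)).map (·.1) =
      (PySem.List.pyRange s (s + l.length) 1).filter
        (fun i => PySem.List.pyGetD l (i - s) ' ' == ch) := by
  induction l generalizing s with
  | nil => simp [PySem.List.enumerate_nil, PySem.List.pyRange_one_eq_nil (le_refl s)]
  | cons x t ih =>
    rw [PySem.List.enumerate_cons,
      PySem.List.pyRange_one_cons (by simp only [List.length_cons]; omega : s < s + ((x :: t).length : Int))]
    rw [List.filter_cons, List.filter_cons]
    have hhead : (PySem.List.pyGetD (x :: t) (s - s) ' ' == ch) = (x == ch) := by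
      have h0 : s - s = (0 : Int) := by ring
      rw [h0, PySem.List.pyGetD_zero_cons]
    have hrange : PySem.List.pyRange (s + 1) (s + ((x :: t).length : Int)) 1 =
        PySem.List.pyRange (s + 1) ((s + 1) + (t.length : Int)) 1 := by
      congr 1; simp; ring
    have htail : (PySem.List.pyRange (s + 1) ((s + 1) + (t.length : Int)) 1).filter
          (fun i => PySem.List.pyGetD (x :: t) (i - s) ' ' == ch) =
        (PySem.List.pyRange (s + 1) ((s + 1) + (t.length : Int)) 1).filter
          (fun i => PySem.List.pyGetD t (i - (s + 1)) ' ' == ch) := by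
      apply List.filter_congr
      intro i hi
      rw [PySem.List.mem_pyRange_one] at hi
      have h0 : 0 ≤ i - (s + 1) := by omega
      have h1 : i - (s + 1) < (t.length : Int) := by omega
      rw [PySem.List.pyGetD_eq_getElem _ ' ' (by omega : (0:Int) ≤ i - s) (by simp only [List.length_cons]; omega),
        PySem.List.pyGetD_eq_getElem _ ' ' h0 h1]
      have hn : (i - s).toNat = (i - (s + 1)).toNat + 1 := by omega
      simp [hn]
    rw [hhead, hrange, htail]
    simp only [show ((s, x).2 == ch) = (x == ch) from rfl]
    by_cases h : x == ch
    · rw [if_pos h, if_pos h, List.map_cons, ih]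
    · rw [if_neg (by simp [h]), if_neg (by simp [h]), ih]

-- the two per-character step functions agree
theorem pv_steps_eq (word2 : String) (m : PySem.Dict Char (List Int))
    (hm : m = (PySem.List.enumerate word2.toList 0).foldl buildArrStep PySem.Dict.empty)
    (arr : List Int) (ch : Char) :
    (if m.contains ch then arr ++ (m.getD ch []).reverse else arr) =
      (PySem.List.pyRange (PySem.Str.len word2 - 1) (-1) (-1)).foldl
        (fun arr idx =>
          if PySem.List.pyGetD word2.toList idx ' ' == ch then arr ++ [idx] else arr) arr := by
  have hA : (if m.contains ch then arr ++ (m.getD ch []).reverse else arr) =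
      arr ++ (m.getD ch []).reverse := by
    by_cases hc : m.contains ch
    · rw [if_pos hc]
    · simp only [Bool.not_eq_true] at hc
      rw [if_neg (by simp [hc]), PySem.Dict.getD_of_not_contains m _ hc]
      simp
  rw [hA]
  simp only [PySem.List.foldl_append_if
    (fun idx => PySem.List.pyGetD word2.toList idx ' ' == ch) (fun i => i)]
  congr 1
  rw [hm, pv_fold_getD, PySem.Dict.getD_empty, List.nil_append,
    pv_enum_filter word2.toList ch 0]
  have hlen : PySem.Str.len word2 = (word2.toList.length : Int) := by
    simp [PySem.Str.len_eq]
  rw [hlen]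
  have : PySem.List.pyRange ((word2.toList.length : Int) - 1) (-1) (-1) =
      (PySem.List.pyRange 0 (word2.toList.length : Int) 1).reverse := by
    rw [PySem.List.pyRange_neg_one_eq_reverse]
    norm_num
  rw [this, List.filter_reverse, List.map_id']
  simp only [zero_add, sub_zero]

-- ===== VERDICT (by name: the statement is the Claim_ definition above) =====
theorem buildArr_spec : Claim_equal_buildArr := by
  intro word1 word2 _
  unfold Spec_buildArr buildArr buildArr_alt
  apply PySem.List.foldl_congr_mem
  intro arr ch _
  exact pv_steps_eq word2 _ rfl arr ch
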